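-- pv_equiv track=rewrite | github.com/cyl0424/algorithm_study | 프로그래머스/2/42584. 주식가격/주식가격.py | solution
-- ===== SOURCE A (Python) =====
-- from collections import deque
--
-- def solution(prices):
--     answer = []
--     dq = deque(prices)
--
--     while dq:
--         price = dq.popleft()
--         sec = 0
--
--         for q in dq:
--             sec += 1
--             if q < price:
--                 break
--
--         answer.append(sec)
--
--     return answer
-- ===== SOURCE B (Python) =====
-- def solution(prices):
--     n = len(prices)
--     answer = [0] * n
--     stack = []
--     for i in range(n):
--         while stack and prices[stack[-1]] > prices[i]:
--             j = stack.pop()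
--             answer[j] = i - j
--         stack.append(i)
--     while stack:
--         j = stack.pop()
--         answer[j] = n - 1 - j
--     return answer
-- ===== Notes on version B (the rewrite author's own statement) =====
-- stated objective: faster
-- what changed: Replaced the per-element rescan of the remaining deque with a single left-to-right pass maintaining a monotonic stack of unresolved indices, resolving each index exactly once.
import Mathlib
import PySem

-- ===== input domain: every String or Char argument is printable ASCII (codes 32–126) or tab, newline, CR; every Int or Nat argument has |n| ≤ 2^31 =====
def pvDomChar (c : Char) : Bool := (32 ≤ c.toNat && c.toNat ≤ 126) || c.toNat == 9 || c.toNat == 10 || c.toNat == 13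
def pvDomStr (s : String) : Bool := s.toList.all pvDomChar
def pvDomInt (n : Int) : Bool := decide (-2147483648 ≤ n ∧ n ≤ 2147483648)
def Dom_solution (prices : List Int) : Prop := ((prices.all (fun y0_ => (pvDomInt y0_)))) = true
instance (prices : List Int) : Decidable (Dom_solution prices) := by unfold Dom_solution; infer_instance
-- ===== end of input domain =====

-- B replaces A's rescan of the remaining deque for every element by one left-to-right
-- pass with a monotonic stack of unresolved indices (objective: faster, O(n) vs O(n^2)).

-- ===== PORT A =====
-- inner `for q in dq: sec += 1; if q < price: break` loop of A
def secA (price : Int) : List Int → Int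
  | [] => 0
  | q :: qs => if q < price then 1 else 1 + secA price qs

-- outer `while dq: price = dq.popleft(); …; answer.append(sec)` loop of A
def solution : List Int → List Int
  | [] => []
  | price :: rest => secA price rest :: solution rest

-- ===== PORT B =====
-- inner `while stack and prices[stack[-1]] > prices[i]: …` loop of B
def drain (prices : List Int) (i : Nat) : List Int → List Nat → List Int × List Nat
  | ans, [] => (ans, [])
  | ans, j :: stk =>
      if prices.getD j 0 > prices.getD i 0 then
        drain prices i (ans.set j ((i : Int) - (j : Int))) stk
      else (ans, j :: stk)

-- one iteration of B's `for i in range(n)` loop: drain, then `stack.append(i)`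
def bstep (prices : List Int) (st : List Int × List Nat) (i : Nat) : List Int × List Nat :=
  let r := drain prices i st.1 st.2
  (r.1, i :: r.2)

-- final `while stack: j = stack.pop(); answer[j] = n - 1 - j` loop of B
def finalize (n : Nat) : List Int → List Nat → List Int
  | ans, [] => ans
  | ans, j :: stk => finalize n (ans.set j ((n : Int) - 1 - (j : Int))) stk

def solution_alt (prices : List Int) : List Int :=
  let n := prices.length
  let st := (List.range n).foldl (bstep prices) (List.replicate n (0 : Int), ([] : List Nat))
  finalize n st.1 st.2

-- ===== PRECONDITION & SPEC =====
def Spec_solution (prices : List Int) (out : List Int) : Prop := out = solution_alt prices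
instance (prices : List Int) (out : List Int) : Decidable (Spec_solution prices out) := by unfold Spec_solution; infer_instance

-- ===== CLAIM (what is proved, stated in full; the proofs are below) =====
def Claim_equal_solution : Prop := ∀ (prices : List Int), Dom_solution prices → Spec_solution prices (solution prices)

-- ===== LEMMAS AND PROOFS =====

-- A's per-element answer, indexed form
def sVal (prices : List Int) (j : Nat) : Int :=
  secA (prices.getD j 0) (prices.drop (j + 1))

theorem secA_min (p : Int) (l : List Int) :
    secA p l = ((min (l.findIdx (fun q => decide (q < p)) + 1) l.length : Nat) : Int) := by
  induction l with
  | nil => simp [secA]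
  | cons q qs ih =>
    by_cases h : q < p
    · simp [secA, h, List.findIdx_cons]
    · rw [show secA p (q :: qs) = 1 + secA p qs from by simp [secA, h], ih, List.findIdx_cons]
      simp only [h, decide_false, cond_false, List.length_cons]
      have hle := List.findIdx_le_length (p := fun q => decide (q < p)) (xs := qs)
      rw [Nat.min_def, Nat.min_def]
      split_ifs <;> push_cast <;> omega

theorem sol_length (l : List Int) : (solution l).length = l.length := by
  induction l with
  | nil => rfl
  | cons p rest ih => simp [solution, ih]

theorem sol_getD (l : List Int) : ∀ (j : Nat), j < l.length →
    (solution l).getD j 0 = sVal l j := by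
  induction l with
  | nil => intro j h; simp at h
  | cons p rest ih =>
    intro j h
    cases j with
    | zero => simp [solution, sVal, List.getD]
    | succ j =>
      simp only [solution, List.getD_cons_succ, sVal] at *
      rw [ih j (by simpa using h)]
      simp

theorem getD_set_lt {l : List Int} {j : Nat} (hj : j < l.length) (v : Int) (m : Nat) :
    (l.set j v).getD m 0 = if j = m then v else l.getD m 0 := by
  by_cases hm : m < l.length
  · rw [List.getD_eq_getElem _ _ (by simpa using hm), List.getD_eq_getElem _ _ hm,
      List.getElem_set]
  · have hlen : (l.set j v).length = l.length := List.length_set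
    rw [List.getD_eq_default _ _ (show l.length ≤ m by omega),
      List.getD_eq_default _ _ (show (l.set j v).length ≤ m by rw [hlen]; omega)]
    have : j ≠ m := by omega
    simp [this]

theorem sVal_resolved (prices : List Int) (j i : Nat) (hji : j < i) (hi : i < prices.length)
    (hnl : ∀ m, j < m → m < i → ¬ (prices.getD m 0 < prices.getD j 0))
    (hlt : prices.getD i 0 < prices.getD j 0) :
    sVal prices j = (i : Int) - (j : Int) := by
  have hdlen : (prices.drop (j + 1)).length = prices.length - (j + 1) := by simp
  have hkey : (prices.drop (j + 1)).findIdx (fun q => decide (q < prices.getD j 0))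
      = i - (j + 1) := by
    rw [List.findIdx_eq (by omega)]
    constructor
    · have he : j + 1 + (i - (j + 1)) = i := by omega
      have h1 : (prices.drop (j + 1))[i - (j + 1)]'(by omega) = prices[i]'hi := by
        rw [List.getElem_drop]
        simp_rw [he]
      rw [h1, decide_eq_true_eq, ← List.getD_eq_getElem prices 0 hi]
      exact hlt
    · intro k hk
      have hk2 : j + 1 + k < prices.length := by omega
      have h1 : (prices.drop (j + 1))[k]'(by omega) = prices[j + 1 + k]'hk2 :=
        List.getElem_drop
      rw [h1, decide_eq_false_iff_not, ← List.getD_eq_getElem prices 0 hk2]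
      exact hnl (j + 1 + k) (by omega) (by omega)
  rw [sVal, secA_min, hkey, hdlen]
  have : min (i - (j + 1) + 1) (prices.length - (j + 1)) = i - j := by omega
  rw [this]
  omega

theorem sVal_unresolved (prices : List Int) (j : Nat) (hj : j < prices.length)
    (hnl : ∀ m, j < m → m < prices.length → ¬ (prices.getD m 0 < prices.getD j 0)) :
    sVal prices j = (prices.length : Int) - 1 - (j : Int) := by
  have hdlen : (prices.drop (j + 1)).length = prices.length - (j + 1) := by simp
  have hkey : (prices.drop (j + 1)).findIdx (fun q => decide (q < prices.getD j 0))
      = (prices.drop (j + 1)).length := by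
    rw [List.findIdx_eq_length]
    intro x hx
    obtain ⟨k, hk, hxk⟩ := List.mem_iff_getElem.mp hx
    have hk2 : j + 1 + k < prices.length := by
      have := hk; rw [hdlen] at this; omega
    have h1 : (prices.drop (j + 1))[k]'hk = prices[j + 1 + k]'hk2 := List.getElem_drop
    have := hnl (j + 1 + k) (by omega) hk2
    subst hxk
    rw [h1, decide_eq_false_iff_not, ← List.getD_eq_getElem prices 0 hk2]
    exact this
  rw [sVal, secA_min, hkey, hdlen]
  have : min (prices.length - (j + 1) + 1) (prices.length - (j + 1))
      = prices.length - (j + 1) := by omega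
  rw [this]
  omega

-- loop invariant of B's main pass after the first k indices have been processed
def StackInv (prices : List Int) (k : Nat) (ans : List Int) (stk : List Nat) : Prop :=
  k ≤ prices.length ∧
  ans.length = prices.length ∧
  (∀ j ∈ stk, j < k) ∧
  List.Pairwise (fun a b => b < a ∧ prices.getD b 0 ≤ prices.getD a 0) stk ∧
  (∀ j ∈ stk, ∀ m, j < m → m < k → ¬ (prices.getD m 0 < prices.getD j 0)) ∧
  (∀ j, j < k → j ∉ stk → ans.getD j 0 = sVal prices j)

theorem drain_inv (prices : List Int) (i : Nat) (hi : i < prices.length) :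
    ∀ (stk : List Nat) (ans : List Int), StackInv prices i ans stk →
    StackInv prices (i + 1) (drain prices i ans stk).1 (i :: (drain prices i ans stk).2) := by
  intro stk
  induction stk with
  | nil =>
    intro ans hInv
    obtain ⟨hk, hlen, _, _, _, h5⟩ := hInv
    refine ⟨by omega, hlen, ?_, ?_, ?_, ?_⟩
    · intro j hj; simp [drain] at hj; omega
    · simp [drain]
    · intro j hj m hm1 hm2
      simp [drain] at hj
      omega
    · intro j hj1 hj2
      simp [drain] at hj2
      exact h5 j (by omega) (by simp)
  | cons j rest ih =>
    intro ans hInv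
    obtain ⟨hk, hlen, h3, h4, h5, h6⟩ := hInv
    have hjlt : j < i := h3 j (by simp)
    by_cases hc : prices.getD j 0 > prices.getD i 0
    · -- pop j, set answer[j] = i - j, continue
      have hset : drain prices i ans (j :: rest)
          = drain prices i (ans.set j ((i : Int) - (j : Int))) rest := by
        simp only [drain]
        rw [if_pos hc]
      rw [hset]
      apply ih
      refine ⟨hk, by simp [hlen], ?_, h4.of_cons, ?_, ?_⟩
      · intro b hb; exact h3 b (by simp [hb])
      · intro b hb m hm1 hm2; exact h5 b (by simp [hb]) m hm1 hm2
      · intro b hb1 hb2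
        rw [getD_set_lt (show j < ans.length by rw [hlen]; omega)]
        by_cases hbj : j = b
        · subst hbj
          rw [if_pos rfl]
          exact (sVal_resolved prices j i hjlt hi
            (fun m hm1 hm2 => h5 j (by simp) m hm1 hm2) hc).symm
        · rw [if_neg hbj]
          exact h6 b hb1 (by simp [hb2]; omega)
    · -- stop: top of stack is ≤ prices[i]
      have hstop : drain prices i ans (j :: rest) = (ans, j :: rest) := by
        simp only [drain]
        rw [if_neg hc]
      rw [hstop]
      have hble : ∀ b ∈ j :: rest, prices.getD b 0 ≤ prices.getD i 0 := by
        intro b hb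
        rcases List.mem_cons.mp hb with h | h
        · subst h; omega
        · have := (List.pairwise_cons.mp h4).1 b h
          omega
      refine ⟨by omega, hlen, ?_, ?_, ?_, ?_⟩
      · intro b hb
        rcases List.mem_cons.mp hb with h | h
        · omega
        · have := h3 b h; omega
      · rw [List.pairwise_cons]
        refine ⟨?_, h4⟩
        intro b hb
        exact ⟨h3 b hb, hble b hb⟩
      · intro b hb m hm1 hm2
        rcases List.mem_cons.mp hb with h | h
        · subst h; omega
        · by_cases hmi : m = i
          · subst hmi
            have := hble b (by simp [h])
            omega
          · exact h5 b h m hm1 (by omega)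
      · intro b hb1 hb2
        simp only [List.mem_cons, not_or] at hb2
        exact h6 b (by omega) (by simp [hb2.2.1, hb2.2.2])

theorem fold_inv (prices : List Int) : ∀ (k : Nat), k ≤ prices.length →
    StackInv prices k
      (((List.range k).foldl (bstep prices) (List.replicate prices.length (0 : Int), ([] : List Nat))).1)
      (((List.range k).foldl (bstep prices) (List.replicate prices.length (0 : Int), ([] : List Nat))).2) := by
  intro k
  induction k with
  | zero =>
    intro _
    refine ⟨by omega, by simp, by simp, by simp, by simp, ?_⟩
    intro j hj; omega
  | succ k ih =>
    intro hk
    have hinv := ih (by omega)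
    rw [List.range_succ, List.foldl_append, List.foldl_cons, List.foldl_nil]
    have := drain_inv prices k (by omega) _ _ hinv
    simpa [bstep] using this

theorem finalize_length (n : Nat) : ∀ (stk : List Nat) (ans : List Int),
    (finalize n ans stk).length = ans.length := by
  intro stk
  induction stk with
  | nil => intro ans; rfl
  | cons j rest ih => intro ans; simp [finalize, ih]

theorem finalize_getD (n : Nat) : ∀ (stk : List Nat) (ans : List Int),
    (∀ j ∈ stk, j < ans.length) → ∀ (m : Nat),
    (finalize n ans stk).getD m 0
      = if m ∈ stk then (n : Int) - 1 - (m : Int) else ans.getD m 0 := by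
  intro stk
  induction stk with
  | nil => intro ans _ m; simp [finalize]
  | cons j rest ih =>
    intro ans hb m
    have hj : j < ans.length := hb j (by simp)
    rw [finalize, ih _ (by intro b hbm; simp [hb b (by simp [hbm])]) m]
    by_cases hm : m ∈ rest
    · rw [if_pos hm, if_pos (by simp [hm])]
    · rw [if_neg hm, getD_set_lt hj]
      by_cases hmj : j = m
      · subst hmj
        rw [if_pos rfl, if_pos (by simp)]
      · rw [if_neg hmj, if_neg (by
          simp only [List.mem_cons, not_or]
          exact ⟨fun h => hmj h.symm, hm⟩)]

theorem solution_alt_eq (prices : List Int) : solution_alt prices = solution prices := by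
  have hinv := fold_inv prices prices.length (le_refl _)
  obtain ⟨_, hlen, h3, h4, h5, h6⟩ := hinv
  set st := (List.range prices.length).foldl (bstep prices)
      (List.replicate prices.length (0 : Int), ([] : List Nat)) with hst
  have hsalt : solution_alt prices = finalize prices.length st.1 st.2 := rfl
  have hlen2 : (solution_alt prices).length = prices.length := by
    rw [hsalt, finalize_length, hlen]
  apply List.ext_getElem (by rw [hlen2, sol_length])
  intro m h1 h2
  have hm : m < prices.length := by rwa [hlen2] at h1
  rw [← List.getD_eq_getElem _ 0 h1, ← List.getD_eq_getElem _ 0 h2, sol_getD _ m hm, hsalt,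
    finalize_getD _ _ _ (by intro b hbm; rw [hlen]; exact lt_of_lt_of_le (h3 b hbm) (le_refl _)) m]
  by_cases hmem : m ∈ st.2
  · rw [if_pos hmem]
    exact (sVal_unresolved prices m hm (fun k hk1 hk2 => h5 m hmem k hk1 hk2)).symm
  · rw [if_neg hmem]
    exact h6 m hm hmem

-- ===== VERDICT (by name: the statement is the Claim_ definition above) =====
theorem solution_spec : Claim_equal_solution := by
  intro prices _
  unfold Spec_solution
  exact (solution_alt_eq prices).symm
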